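-- pv_equiv track=rewrite | github.com/SachithraPinnaduwa/FYP | benchmark2/subjects/dataset/subject_90.py | transform_array_after_operations
-- ===== SOURCE A (Python) =====
-- def transform_array_after_operations(a, k):
--     li = []
--     for i in range(k):
--         m = max(a)
--         a = [m - i for i in a]
--         if a in li:
--             if not k % 2:
--                 return li[-1]
--             return a
--         li.append(a)
--     return a
-- ===== SOURCE B (Python) =====
-- def transform_array_after_operations(a, k):
--     if k <= 0:
--         return a
--     if k % 2:
--         m = max(a)
--         return [m - x for x in a]
--     mn = min(a)
--     return [x - mn for x in a]
-- ===== Notes on version B (the rewrite author's own statement) =====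
-- stated objective: simpler
-- what changed: Replaced A's cycle-detecting loop with a history list and list-membership tests by a closed-form parity branch: the transform has period 2, so odd k gives [max(a)-x for x in a] and even k>=2 gives [x-min(a) for x in a].
-- outside the precondition, e.g. on transform_array_after_operations([], 2): A raises ValueError, B raises ValueError
import Mathlib
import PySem

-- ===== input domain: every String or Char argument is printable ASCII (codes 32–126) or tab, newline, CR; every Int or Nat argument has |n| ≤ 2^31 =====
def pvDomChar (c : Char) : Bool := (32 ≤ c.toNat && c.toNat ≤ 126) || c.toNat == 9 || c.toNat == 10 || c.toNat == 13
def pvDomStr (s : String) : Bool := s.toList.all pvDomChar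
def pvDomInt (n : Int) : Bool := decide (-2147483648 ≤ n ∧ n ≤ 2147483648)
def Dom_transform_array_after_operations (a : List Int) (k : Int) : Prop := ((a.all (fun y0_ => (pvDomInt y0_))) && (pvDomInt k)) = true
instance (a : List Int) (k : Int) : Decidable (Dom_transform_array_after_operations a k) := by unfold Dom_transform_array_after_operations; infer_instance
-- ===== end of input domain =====

-- B replaces A's cycle-detecting loop by a closed-form parity branch (the transform has period 2); objective: simpler.

-- ===== PORT A =====
-- A's for-loop over range(k) with early returns, as structural recursion on the
-- remaining iteration count k.toNat; max(a) is PySem.List.max? (none = ValueError,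
-- excluded by Pre_), li[-1] is pyGet? li (-1).
def pvLoopA (k : Int) : List Int → List (List Int) → Nat → List Int
  | a, _li, 0 => a
  | a, li, n+1 =>
    let m := (PySem.List.max? a (fun x => x)).getD 0
    let a' := a.map (fun x => m - x)
    if a' ∈ li then
      if PySem.Int.mod k 2 = 0 then (PySem.List.pyGet? li (-1)).getD []
      else a'
    else pvLoopA k a' (li ++ [a']) n

def transform_array_after_operations (a : List Int) (k : Int) : List Int :=
  pvLoopA k a [] k.toNat

-- ===== PORT B =====
def transform_array_after_operations_alt (a : List Int) (k : Int) : List Int :=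
  if k ≤ 0 then a
  else if PySem.Int.mod k 2 ≠ 0 then
    let m := (PySem.List.max? a (fun x => x)).getD 0
    a.map (fun x => m - x)
  else
    let mn := (PySem.List.min? a (fun x => x)).getD 0
    a.map (fun x => x - mn)

-- ===== PRECONDITION & SPEC =====
-- Pre_ excludes only the inputs where Python A raises: empty a with k ≥ 1 (max([]) is a ValueError).
def Pre_transform_array_after_operations (a : List Int) (k : Int) : Prop := a = [] → k ≤ 0
instance (a : List Int) (k : Int) : Decidable (Pre_transform_array_after_operations a k) := by unfold Pre_transform_array_after_operations; infer_instance

def pvWitness_transform_array_after_operations : List Int × Int := ([1, 3, 2], 4)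

def Spec_transform_array_after_operations (a : List Int) (k : Int) (out : List Int) : Prop := out = transform_array_after_operations_alt a k
instance (a : List Int) (k : Int) (out : List Int) : Decidable (Spec_transform_array_after_operations a k out) := by unfold Spec_transform_array_after_operations; infer_instance

-- ===== CLAIM (what is proved, stated in full; the proofs are below) =====
def Claim_equal_transform_array_after_operations : Prop := ∀ (a : List Int) (k : Int), Dom_transform_array_after_operations a k → Pre_transform_array_after_operations a k → Spec_transform_array_after_operations a k (transform_array_after_operations a k)

-- ===== LEMMAS AND PROOFS =====

theorem pv_foldl_max_map_sub (c : Int) (t : List Int) : ∀ x : Int,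
    (t.map (fun y => c - y)).foldl max (c - x) = c - t.foldl min x := by
  induction t with
  | nil => intro x; simp
  | cons h tl ih =>
      intro x
      simp only [List.map_cons, List.foldl_cons, max_sub_sub_left]
      exact ih (min x h)

theorem pv_foldl_max_map_sub' (c : Int) (t : List Int) : ∀ x : Int,
    (t.map (fun y => y - c)).foldl max (x - c) = t.foldl max x - c := by
  induction t with
  | nil => intro x; simp
  | cons h tl ih =>
      intro x
      simp only [List.map_cons, List.foldl_cons, max_sub_sub_right]
      exact ih (max x h)

theorem pv_mod_two (k : Int) : PySem.Int.mod k 2 = k % 2 :=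
  PySem.Int.mod_eq_emod_of_pos (by omega)

theorem transform_array_after_operations_spec : Claim_equal_transform_array_after_operations := by
  intro a k _hdom hpre
  unfold Spec_transform_array_after_operations
  by_cases hk : k ≤ 0
  · unfold transform_array_after_operations transform_array_after_operations_alt
    rw [Int.toNat_of_nonpos hk]
    simp [pvLoopA, hk]
  · rw [not_le] at hk
    obtain ⟨x, t, rfl⟩ : ∃ x t, a = x :: t := by
      cases a with
      | nil => exact absurd (hpre rfl) (by omega)
      | cons x t => exact ⟨x, t, rfl⟩
    have hmax : PySem.List.max? (x :: t) (fun y => y) = some (t.foldl max x) :=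
      PySem.List.max?_id_cons x t
    have hmin : PySem.List.min? (x :: t) (fun y => y) = some (t.foldl min x) :=
      PySem.List.min?_id_cons x t
    set M := t.foldl max x with hM
    set mn := t.foldl min x with hmn
    set a1 := (x :: t).map (fun y => M - y) with ha1
    set a2 := (x :: t).map (fun y => y - mn) with ha2
    have hmax1 : PySem.List.max? a1 (fun y => y) = some (M - mn) := by
      rw [ha1, List.map_cons, PySem.List.max?_id_cons, pv_foldl_max_map_sub]
    have hmax2 : PySem.List.max? a2 (fun y => y) = some (M - mn) := by
      rw [ha2, List.map_cons, PySem.List.max?_id_cons, pv_foldl_max_map_sub']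
    have hstep12 : a1.map (fun y => (M - mn) - y) = a2 := by
      rw [ha1, ha2, List.map_map]
      apply List.map_congr_left
      intro y _
      simp only [Function.comp_apply]
      ring
    have hstep21 : a2.map (fun y => (M - mn) - y) = a1 := by
      rw [ha1, ha2, List.map_map]
      apply List.map_congr_left
      intro y _
      simp only [Function.comp_apply]
      ring
    have hkn : (k.toNat : Int) = k := Int.toNat_of_nonneg (by omega)
    have hBodd : k % 2 ≠ 0 →
        transform_array_after_operations_alt (x :: t) k = a1 := by
      intro hodd
      unfold transform_array_after_operations_alt
      rw [if_neg (by omega), if_pos (by rw [pv_mod_two]; exact hodd), hmax]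
      rfl
    have hBeven : k % 2 = 0 →
        transform_array_after_operations_alt (x :: t) k = a2 := by
      intro heven
      unfold transform_array_after_operations_alt
      rw [if_neg (by omega), if_neg (by rw [pv_mod_two]; simpa using heven), hmin]
      rfl
    unfold transform_array_after_operations
    match hn : k.toNat, hkn with
    | 0, hkn => omega
    | 1, hkn =>
      simp only [pvLoopA, hmax, Option.getD_some, List.not_mem_nil, ite_false,
        ← ha1]
      rw [hBodd (by omega)]
    | 2, hkn =>
      simp only [pvLoopA, hmax, Option.getD_some, List.not_mem_nil, ite_false,
        List.nil_append, ← ha1, hmax1, hstep12]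
      rw [hBeven (by omega)]
      by_cases heq : a2 ∈ [a1]
      · have he : a2 = a1 := by simpa using heq
        rw [if_pos heq, if_pos (by rw [pv_mod_two]; omega)]
        simp [PySem.List.pyGet?_neg_one, he]
      · rw [if_neg heq]
    | (m+3), hkn =>
      simp only [pvLoopA, hmax, Option.getD_some, List.not_mem_nil, ite_false,
        List.nil_append, ← ha1, hmax1, hstep12]
      by_cases heq : a2 ∈ [a1]
      · have he : a2 = a1 := by simpa using heq
        rw [if_pos heq]
        by_cases hpar : k % 2 = 0
        · rw [if_pos (by rw [pv_mod_two]; exact hpar), hBeven hpar]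
          simp [PySem.List.pyGet?_neg_one, he]
        · rw [if_neg (by rw [pv_mod_two]; exact hpar), hBodd hpar, he]
      · rw [if_neg heq]
        simp only [hmax2, Option.getD_some, hstep21]
        have hmem : a1 ∈ [a1] ++ [a2] := by simp
        rw [if_pos hmem]
        by_cases hpar : k % 2 = 0
        · rw [if_pos (by rw [pv_mod_two]; exact hpar), hBeven hpar]
          simp [PySem.List.pyGet?_neg_one]
        · rw [if_neg (by rw [pv_mod_two]; exact hpar), hBodd hpar]
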